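-- pv_equiv track=rewrite | github.com/edarchis/advent2018 | day02/day02p1.py | other_compute_code
-- ===== SOURCE A (Python) =====
-- from collections import Counter
--
-- def has_doubles_and_triples(code):
--     letter_count = Counter(code)
--     return int(2 in letter_count.values()), int(3 in letter_count.values())
--
-- def other_compute_code(codelist):
--     dubs = 0
--     trips = 0
--     for code in codelist:
--         d, t = has_doubles_and_triples(code)
--         dubs += d
--         trips += t
--     return dubs * trips
-- ===== SOURCE B (Python) =====
-- def run_lengths(chars):
--     # chars is sorted; return the lengths of its maximal runs of equal chars
--     if not chars:
--         return []
--     c = chars[0]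
--     i = 1
--     while i < len(chars) and chars[i] == c:
--         i += 1
--     return [i] + run_lengths(chars[i:])
--
-- def other_compute_code(codelist):
--     dubs = 0
--     trips = 0
--     for code in codelist:
--         lengths = run_lengths(sorted(code))
--         if 2 in lengths:
--             dubs += 1
--         if 3 in lengths:
--             trips += 1
--     return dubs * trips
-- ===== Notes on version B (the rewrite author's own statement) =====
-- stated objective: alternative
-- what changed: The per-code letter tally by Counter (hash multiset) is replaced by sorting the code and scanning run lengths of equal adjacent characters; 2/3 membership is tested on the run lengths instead of the Counter values.
import Mathlib
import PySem

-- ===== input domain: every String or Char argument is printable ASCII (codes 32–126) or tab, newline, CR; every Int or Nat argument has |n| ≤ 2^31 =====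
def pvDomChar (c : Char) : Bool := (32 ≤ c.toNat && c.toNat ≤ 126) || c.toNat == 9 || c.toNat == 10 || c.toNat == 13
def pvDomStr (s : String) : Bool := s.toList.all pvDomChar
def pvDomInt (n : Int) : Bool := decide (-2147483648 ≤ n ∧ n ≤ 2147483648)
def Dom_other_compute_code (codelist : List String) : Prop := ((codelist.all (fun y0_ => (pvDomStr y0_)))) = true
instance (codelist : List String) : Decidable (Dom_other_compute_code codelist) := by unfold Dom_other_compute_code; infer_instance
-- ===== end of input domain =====

-- B replaces the Counter-based per-code tally by sort-and-scan over run lengths; same results.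
-- ===== PORT A =====
def pvHasDT (code : String) : Int × Int :=
  let letter_count := PySem.Dict.counter code.toList
  ((if (2 : Int) ∈ letter_count.values then 1 else 0),
   (if (3 : Int) ∈ letter_count.values then 1 else 0))

def other_compute_code (codelist : List String) : Int :=
  let p := codelist.foldl (fun (dt : Int × Int) code =>
    let r := pvHasDT code
    (dt.1 + r.1, dt.2 + r.2)) (0, 0)
  p.1 * p.2

-- ===== PORT B =====
def pvRunLengths : List Char → List Int
  | [] => []
  | c :: rest =>
    ((1 : Int) + (rest.takeWhile (fun x => x == c)).length) ::
      pvRunLengths (rest.dropWhile (fun x => x == c))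
termination_by l => l.length
decreasing_by
  exact Nat.lt_succ_of_le (List.Sublist.length_le (List.dropWhile_sublist _))

def pvHasDT_alt (code : String) : Int × Int :=
  let lengths := pvRunLengths (PySem.List.sorted code.toList (fun x => x) false)
  ((if (2 : Int) ∈ lengths then 1 else 0),
   (if (3 : Int) ∈ lengths then 1 else 0))

def other_compute_code_alt (codelist : List String) : Int :=
  let p := codelist.foldl (fun (dt : Int × Int) code =>
    let r := pvHasDT_alt code
    (dt.1 + r.1, dt.2 + r.2)) (0, 0)
  p.1 * p.2

-- ===== PRECONDITION & SPEC =====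
def Spec_other_compute_code (codelist : List String) (out : Int) : Prop := out = other_compute_code_alt codelist
instance (codelist : List String) (out : Int) : Decidable (Spec_other_compute_code codelist out) := by unfold Spec_other_compute_code; infer_instance

-- ===== CLAIM (what is proved, stated in full; the proofs are below) =====
def Claim_equal_other_compute_code : Prop := ∀ (codelist : List String), Dom_other_compute_code codelist → Spec_other_compute_code codelist (other_compute_code codelist)

-- ===== LEMMAS AND PROOFS =====

-- ===== VERDICT (by name: the statement is the Claim_ definition above) =====
lemma mem_values_counter (l : List Char) (k : Int) :
    k ∈ (PySem.Dict.counter l).values ↔ ∃ c, c ∈ l ∧ (l.count c : Int) = k := by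
  rw [PySem.Dict.values_eq_map_keys _ (PySem.Dict.nodup_keys_counter l) 0]
  simp [PySem.Dict.keys_counter, PySem.Dict.getD_counter, PySem.Set.mem_ofList, eq_comm]

lemma dropWhile_gt (c : Char) : ∀ (rest : List Char), rest.Pairwise (· ≤ ·) →
    (∀ x ∈ rest, c ≤ x) → ∀ x ∈ rest.dropWhile (fun y => y == c), c < x
  | [], _, _, x, hx => by simp at hx
  | a :: l, hp, hb, x, hx => by
    rw [List.dropWhile_cons] at hx
    by_cases hac : (a == c) = true
    · rw [if_pos hac] at hx
      exact dropWhile_gt c l (List.pairwise_cons.mp hp).2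
        (fun y hy => hb y (List.mem_cons_of_mem _ hy)) x hx
    · rw [if_neg hac] at hx
      have hca : c < a :=
        lt_of_le_of_ne (hb a List.mem_cons_self) (fun h => hac (by simp [h.symm]))
      rcases List.mem_cons.mp hx with rfl | hx'
      · exact hca
      · exact lt_of_lt_of_le hca ((List.pairwise_cons.mp hp).1 x hx')

lemma mem_runLengths (s : List Char) (hs : s.Pairwise (· ≤ ·)) (k : Int) :
    k ∈ pvRunLengths s ↔ ∃ c, c ∈ s ∧ (s.count c : Int) = k := by
  induction s using pvRunLengths.induct with
  | case1 => simp [pvRunLengths]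
  | case2 c rest ih =>
    rw [List.pairwise_cons] at hs
    obtain ⟨hc, hrest⟩ := hs
    rw [pvRunLengths]
    obtain ⟨t, ht⟩ : ∃ t, List.takeWhile (fun x => x == c) rest = t := ⟨_, rfl⟩
    obtain ⟨d, hd⟩ : ∃ d, List.dropWhile (fun x => x == c) rest = d := ⟨_, rfl⟩
    rw [ht, hd]
    rw [hd] at ih
    have hsplit : t ++ d = rest := by rw [← ht, ← hd]; exact List.takeWhile_append_dropWhile
    have htc : ∀ x ∈ t, x = c := by
      intro x hx
      have := List.mem_takeWhile_imp (ht ▸ hx)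
      simpa using this
    have hdsub : d.Sublist rest := hd ▸ List.dropWhile_sublist _
    have hdp : d.Pairwise (· ≤ ·) := hrest.sublist hdsub
    have hdlt : ∀ x ∈ d, c < x := fun x hx => dropWhile_gt c rest hrest hc x (hd ▸ hx)
    have hcnd : d.count c = 0 := by
      rw [List.count_eq_zero]
      intro hmem; exact absurd rfl (ne_of_gt (hdlt c hmem))
    have hcount_c : ((c :: rest).count c : Int) = 1 + t.length := by
      have htl : t.count c = t.length := by
        rw [List.count_eq_length]
        intro x hx; exact ((htc x hx) ▸ rfl)
      rw [List.count_cons_self, ← hsplit, List.count_append, hcnd, htl]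
      push_cast; ring
    have hcount_d : ∀ x ∈ d, ((c :: rest).count x : Int) = d.count x := by
      intro x hx
      have hxc : x ≠ c := fun h => absurd rfl (ne_of_gt (h ▸ hdlt x hx))
      have hxt : t.count x = 0 := by
        rw [List.count_eq_zero]
        intro hmem; exact hxc (htc x hmem)
      rw [List.count_cons_of_ne (Ne.symm hxc), ← hsplit, List.count_append, hxt]
      simp
    constructor
    · intro hk
      rcases List.mem_cons.mp hk with hk1 | hk2
      · exact ⟨c, List.mem_cons_self, by rw [hcount_c, hk1]⟩
      · obtain ⟨x, hxd, hxk⟩ := (ih hdp).mp hk2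
        exact ⟨x, List.mem_cons_of_mem _ (hdsub.mem hxd),
          by rw [hcount_d x hxd]; exact hxk⟩
    · rintro ⟨x, hxs, hxk⟩
      by_cases hxc : x = c
      · subst hxc
        exact List.mem_cons.mpr (Or.inl (by rw [← hxk, hcount_c]))
      · have hxrest : x ∈ rest := by
          rcases List.mem_cons.mp hxs with h | h
          · exact absurd h hxc
          · exact h
        have hxd : x ∈ d := by
          rcases List.mem_append.mp (hsplit ▸ hxrest) with h | h
          · exact absurd (htc x h) hxc
          · exact h
        exact List.mem_cons_of_mem _
          ((ih hdp).mpr ⟨x, hxd, by rw [← hcount_d x hxd]; exact hxk⟩)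

lemma hasDT_eq (code : String) : pvHasDT code = pvHasDT_alt code := by
  unfold pvHasDT pvHasDT_alt
  have hperm : (PySem.List.sorted code.toList (fun x => x) false).Perm code.toList :=
    PySem.List.sorted_perm ..
  have hp : (PySem.List.sorted code.toList (fun x => x) false).Pairwise (· ≤ ·) := by
    have := PySem.List.sorted_pairwise (xs := code.toList) (key := fun x : Char => x)
    simpa using this
  have key : ∀ k : Int, (k ∈ (PySem.Dict.counter code.toList).values) =
      (k ∈ pvRunLengths (PySem.List.sorted code.toList (fun x => x) false)) := by
    intro k
    rw [eq_iff_iff, mem_values_counter, mem_runLengths _ hp k]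
    constructor
    · rintro ⟨c, hcl, hk⟩
      exact ⟨c, hperm.mem_iff.mpr hcl, by rw [hperm.count_eq]; exact hk⟩
    · rintro ⟨c, hcl, hk⟩
      exact ⟨c, hperm.mem_iff.mp hcl, by rw [← hperm.count_eq]; exact hk⟩
  simp only [key]

theorem other_compute_code_spec : Claim_equal_other_compute_code := by
  intro codelist _
  unfold Spec_other_compute_code other_compute_code other_compute_code_alt
  simp only [hasDT_eq]
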